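-- pv_equiv track=rewrite | github.com/bodo/multiple-choice-app | cms/colors.py | custom_sub_index_1based
-- ===== SOURCE A (Python) =====
-- RESERVED_SUBS = frozenset({"Main", "Answer Key", "Answer Options", "Answer"})
--
-- def custom_sub_index_1based(subs: list[str], sub: str) -> int | None:
--     """1-based index among subs that are not Main/Answer Key/Answer Options."""
--     if sub not in subs or sub in RESERVED_SUBS:
--         return None
--     customs = [s for s in subs if s not in RESERVED_SUBS]
--     try:
--         return customs.index(sub) + 1
--     except ValueError:
--         return None
-- ===== SOURCE B (Python) =====
-- RESERVED_SUBS = frozenset({"Main", "Answer Key", "Answer Options", "Answer"})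
--
-- def custom_sub_index_1based(subs, sub):
--     """1-based index among subs that are not Main/Answer Key/Answer Options."""
--     if sub in RESERVED_SUBS:
--         return None
--     idx = 0
--     for s in subs:
--         if s not in RESERVED_SUBS:
--             idx += 1
--             if s == sub:
--                 return idx
--     return None
-- ===== Notes on version B (the rewrite author's own statement) =====
-- stated objective: simpler
-- what changed: Replaces the membership pre-check plus a filtered intermediate list plus .index (three passes and an allocation) with a single early-terminating counting scan.
import Mathlib
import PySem

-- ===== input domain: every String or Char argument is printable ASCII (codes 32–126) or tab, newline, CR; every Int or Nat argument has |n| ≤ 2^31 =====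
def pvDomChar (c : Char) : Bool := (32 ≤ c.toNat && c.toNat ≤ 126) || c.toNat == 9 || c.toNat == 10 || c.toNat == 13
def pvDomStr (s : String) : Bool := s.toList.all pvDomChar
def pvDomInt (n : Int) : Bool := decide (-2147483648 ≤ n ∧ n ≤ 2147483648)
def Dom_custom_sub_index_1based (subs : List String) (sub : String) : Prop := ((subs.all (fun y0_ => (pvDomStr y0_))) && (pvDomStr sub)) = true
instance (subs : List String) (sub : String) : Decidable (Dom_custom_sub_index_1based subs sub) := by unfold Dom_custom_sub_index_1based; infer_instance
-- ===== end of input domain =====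

-- B replaces the membership pre-check + filtered list + .index (multiple passes) with a
-- single early-terminating counting scan; same result, simpler.

-- ===== PORT A =====
def pvReserved : List String := ["Main", "Answer Key", "Answer Options", "Answer"]

def custom_sub_index_1based (subs : List String) (sub : String) : Option Int :=
  if ¬ (sub ∈ subs) ∨ sub ∈ pvReserved then none
  else
    let customs := subs.filter (fun s => !(pvReserved.contains s))
    match PySem.List.index? customs sub with
    | some i => some ((i : Int) + 1)
    | none => none

-- ===== PORT B =====
def pvScan (sub : String) : List String → Int → Option Int
  | [], _ => none
  | s :: rest, idx =>
    if pvReserved.contains s then pvScan sub rest idx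
    else
      let idx' := idx + 1
      if s == sub then some idx' else pvScan sub rest idx'

def custom_sub_index_1based_alt (subs : List String) (sub : String) : Option Int :=
  if sub ∈ pvReserved then none else pvScan sub subs 0

-- ===== PRECONDITION & SPEC =====
def Spec_custom_sub_index_1based (subs : List String) (sub : String) (out : Option Int) : Prop := out = custom_sub_index_1based_alt subs sub
instance (subs : List String) (sub : String) (out : Option Int) : Decidable (Spec_custom_sub_index_1based subs sub out) := by unfold Spec_custom_sub_index_1based; infer_instance

-- ===== CLAIM (what is proved, stated in full; the proofs are below) =====
def Claim_equal_custom_sub_index_1based : Prop := ∀ (subs : List String) (sub : String), Dom_custom_sub_index_1based subs sub → Spec_custom_sub_index_1based subs sub (custom_sub_index_1based subs sub)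

-- ===== LEMMAS AND PROOFS =====

-- ===== VERDICT (by name: the statement is the Claim_ definition above) =====
-- The scan equals "index of sub in the filtered list, offset by idx+1".
lemma pvScan_eq_index (sub : String) (subs : List String) (idx : Int) :
    pvScan sub subs idx =
      (PySem.List.index? (subs.filter (fun s => !(pvReserved.contains s))) sub).map
        (fun (i : Nat) => idx + 1 + (i : Int)) := by
  induction subs generalizing idx with
  | nil => rfl
  | cons s rest ih =>
    by_cases hres : pvReserved.contains s
    · rw [List.filter_cons_of_neg (by simpa using hres)]
      show pvScan sub (s :: rest) idx = _
      unfold pvScan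
      rw [if_pos hres, ih]
    · rw [List.filter_cons_of_pos (by simpa using hres)]
      by_cases hs : s = sub
      · subst hs
        rw [PySem.List.index?_cons_self]
        unfold pvScan
        rw [if_neg hres, if_pos (by simp)]
        simp
      · rw [PySem.List.index?_cons_of_ne _ hs]
        unfold pvScan
        rw [if_neg hres, if_neg (by simp [hs]), ih]
        cases PySem.List.index? (rest.filter (fun s => !(pvReserved.contains s))) sub with
        | none => rfl
        | some i => simp; ring

theorem custom_sub_index_1based_spec : Claim_equal_custom_sub_index_1based := by
  intro subs sub _
  unfold Spec_custom_sub_index_1based custom_sub_index_1based custom_sub_index_1based_alt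
  by_cases hres : sub ∈ pvReserved
  · rw [if_pos (Or.inr hres), if_pos hres]
  · rw [if_neg hres, pvScan_eq_index]
    by_cases hmem : sub ∈ subs
    · rw [if_neg (by simp [hmem, hres])]
      show (match PySem.List.index? (subs.filter (fun s => !(pvReserved.contains s))) sub with
            | some i => some ((i : Int) + 1)
            | none => none) = _
      have hmemf : sub ∈ subs.filter (fun s => !(pvReserved.contains s)) := by
        simp [List.mem_filter, hmem]; simpa using hres
      have h := (PySem.List.index?_isSome_iff (subs.filter (fun s => !(pvReserved.contains s))) sub).mpr hmemf
      cases hi : PySem.List.index? (subs.filter (fun s => !(pvReserved.contains s))) sub with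
      | none => rw [hi] at h; simp at h
      | some i => simp; ring
    · rw [if_pos (Or.inl hmem)]
      have hnm : sub ∉ subs.filter (fun s => !(pvReserved.contains s)) := by
        simp [List.mem_filter]; intro h; exact absurd h hmem
      rw [(PySem.List.index?_eq_none_iff _ _).mpr hnm]
      rfl
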